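-- pv_equiv track=rewrite | github.com/mbarrientos/project-euler | reto381.py | calculaFuncion
-- ===== SOURCE A (Python) =====
-- def factorial(elem):
--     res = 1
--     for i in range(1, elem + 1):
--         res *= i
--     return res
--
-- def calculaFuncion(p):
--     aux = factorial(p - 5)
--     sum = 0
--     for i in range(4, 0, -1):
--         sum += aux
--         aux *= (p - i)
--     sum += aux
--     return sum % p
-- ===== SOURCE B (Python) =====
-- def calculaFuncion(p):
--     # Reduce modulo p at every step: all operands stay below |p|, and the
--     # five-term tail collapses to the constant 9, since (p-i) = -i (mod p)
--     # makes the bracket 1 - 4 + 12 - 24 + 24 = 9 for every p.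
--     f = 1
--     for i in range(1, p - 4):
--         f = f * i % p
--     return 9 * f % p
-- ===== Notes on version B (the rewrite author's own statement) =====
-- stated objective: faster
-- what changed: B keeps the factorial reduced mod p at every multiplication and replaces A's 5-step big-number tail loop by the constant 9 (since p-i ≡ -i mod p the bracket 1-4+12-24+24 = 9), so no huge integers are ever built.
import Mathlib
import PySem

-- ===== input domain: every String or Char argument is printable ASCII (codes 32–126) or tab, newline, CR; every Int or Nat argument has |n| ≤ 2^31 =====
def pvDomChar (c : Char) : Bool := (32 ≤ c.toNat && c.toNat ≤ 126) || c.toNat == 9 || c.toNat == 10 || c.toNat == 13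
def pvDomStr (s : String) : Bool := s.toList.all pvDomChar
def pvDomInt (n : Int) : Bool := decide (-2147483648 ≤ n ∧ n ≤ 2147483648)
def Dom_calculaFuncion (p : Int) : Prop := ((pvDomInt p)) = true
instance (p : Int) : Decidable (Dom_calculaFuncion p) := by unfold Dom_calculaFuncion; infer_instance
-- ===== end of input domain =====

-- B keeps the running factorial reduced mod p and replaces A's five-term tail loop by the
-- constant factor 9 (since p-i ≡ -i mod p), avoiding huge intermediate integers (faster).

-- ===== PORT A =====
def factorial (elem : Int) : Int :=
  (PySem.List.pyRange 1 (elem + 1) 1).foldl (fun res i => res * i) 1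

def calculaFuncion (p : Int) : Int :=
  let aux := factorial (p - 5)
  let st := (PySem.List.pyRange 4 0 (-1)).foldl
    (fun (st : Int × Int) i => (st.1 + st.2, st.2 * (p - i))) (0, aux)
  PySem.Int.mod (st.1 + st.2) p

-- ===== PORT B =====
def calculaFuncion_alt (p : Int) : Int :=
  let f := (PySem.List.pyRange 1 (p - 4) 1).foldl (fun f i => PySem.Int.mod (f * i) p) 1
  PySem.Int.mod (9 * f) p

-- ===== PRECONDITION & SPEC =====
-- Python raises ZeroDivisionError on p = 0 (the final '% p'); both programs raise there.
def Pre_calculaFuncion (p : Int) : Prop := p ≠ 0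
instance (p : Int) : Decidable (Pre_calculaFuncion p) := by unfold Pre_calculaFuncion; infer_instance
def pvWitness_calculaFuncion : Int := 7

def Spec_calculaFuncion (p : Int) (out : Int) : Prop := out = calculaFuncion_alt p
instance (p : Int) (out : Int) : Decidable (Spec_calculaFuncion p out) := by unfold Spec_calculaFuncion; infer_instance

-- ===== CLAIM (what is proved, stated in full; the proofs are below) =====
def Claim_equal_calculaFuncion : Prop := ∀ (p : Int), Dom_calculaFuncion p → Pre_calculaFuncion p → Spec_calculaFuncion p (calculaFuncion p)

-- ===== LEMMAS AND PROOFS =====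

-- PySem.Int.mod leaves the residue class unchanged (every divisor).
theorem pymod_emod (a p : Int) : (PySem.Int.mod a p) % p = a % p := by
  have h := PySem.Int.floordiv_mul_add_mod a p
  have : PySem.Int.mod a p = a - PySem.Int.floordiv a p * p := by omega
  rw [this]
  simp [Int.sub_emod, Int.mul_emod_left]

-- Congruent numbers have the same Python mod (every nonzero divisor, either sign).
theorem pymod_congr (a b p : Int) (hp : p ≠ 0) (h : a % p = b % p) :
    PySem.Int.mod a p = PySem.Int.mod b p := by
  rcases lt_or_gt_of_ne hp with hneg | hpos
  · have ha := PySem.Int.mod_neg_bounds a (b := p) hneg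
    have hb := PySem.Int.mod_neg_bounds b (b := p) hneg
    have hea : (PySem.Int.mod a p) % p = (PySem.Int.mod b p) % p := by
      rw [pymod_emod, pymod_emod, h]
    have hdvd : p ∣ (PySem.Int.mod a p - PySem.Int.mod b p) :=
      Int.dvd_of_emod_eq_zero ((Int.emod_eq_emod_iff_emod_sub_eq_zero).1 hea)
    rcases hdvd with ⟨k, hk⟩
    have hk0 : k = 0 := by nlinarith [ha.1, ha.2, hb.1, hb.2]
    rw [hk0, mul_zero] at hk
    omega
  · rw [PySem.Int.mod_eq_emod_of_pos hpos, PySem.Int.mod_eq_emod_of_pos hpos, h]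

-- The reduced fold of B tracks A's plain product fold, residue-wise.
theorem fold_reduce (p : Int) (l : List Int) : ∀ (a b : Int), a % p = b % p →
    (l.foldl (fun f i => PySem.Int.mod (f * i) p) a) % p
      = (l.foldl (fun f i => f * i) b) % p := by
  induction l with
  | nil => intro a b h; simpa using h
  | cons x xs ih =>
      intro a b h
      simp only [List.foldl]
      apply ih
      rw [pymod_emod, Int.mul_emod, h, ← Int.mul_emod]

theorem calculaFuncion_spec : Claim_equal_calculaFuncion := by
  intro p _ hp
  unfold Spec_calculaFuncion calculaFuncion calculaFuncion_alt factorial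
  have hrange : PySem.List.pyRange 4 0 (-1) = [4, 3, 2, 1] := by decide
  have harg : p - 5 + 1 = p - 4 := by ring
  rw [hrange, harg]
  simp only [List.foldl]
  set f := (PySem.List.pyRange 1 (p - 4) 1).foldl (fun res i => res * i) 1 with hf
  set g := (PySem.List.pyRange 1 (p - 4) 1).foldl (fun f i => PySem.Int.mod (f * i) p) 1 with hg
  apply pymod_congr _ _ _ hp
  have hfg : g % p = f % p := fold_reduce p _ 1 1 rfl
  have hexpand :
      (0 + f + f * (p - 4) + f * (p - 4) * (p - 3) + f * (p - 4) * (p - 3) * (p - 2))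
        + f * (p - 4) * (p - 3) * (p - 2) * (p - 1)
      = 9 * f + (f * (p ^ 3 - 9 * p ^ 2 + 27 * p - 30)) * p := by ring
  rw [hexpand, Int.add_mul_emod_self_right, Int.mul_emod, ← hfg, ← Int.mul_emod]
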